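-- pv_equiv track=rewrite | github.com/pypi-data/pypi-mirror-401 | packages/rara-subject-indexer/rara_subject_indexer-3.0.33-py3-none-any.whl/rara_subject_indexer/utils/clusterers/base_clusterer.py | get_cluster_head
-- ===== SOURCE A (Python) =====
-- from collections import defaultdict
-- from typing import Dict, List, NoReturn
--
-- def get_cluster_head(cluster_elements: List[str]) -> str:
--     """ Gets the base element of the cluster
--     following these restrictions:
--         1. Should contain as many words as possible &
--         2. Should be the shortest of such candidates.
--
--     Parameters
--     -----------
--     cluster_elements: List[str]
--         List of cluster elements
--
--     Returns
--     -----------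
--     cluster_head: str
--         Most likely base form out of all cluster elements.
--         E.g. cluster_elements=["Tamm", "Uku Tamm", "Uku Tammele"]
--         should return "Uku Tamm.
--     """
--     word_counts = defaultdict(list)
--     for elem in cluster_elements:
--         word_counts[len(elem.split())].append(elem)
--     word_counts_list = sorted(
--         list(word_counts.items()), key=lambda x: x[0], reverse=True
--     )
--     candidates = word_counts_list[0][1]
--     cluster_head = min(candidates, key=len)
--     return cluster_head
-- ===== SOURCE B (Python) =====
-- def get_cluster_head(cluster_elements):
--     """Single linear scan keeping the current best (most words, then shortest,
--     first wins ties) instead of grouping into a dict and sorting the buckets."""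
--     best = cluster_elements[0]
--     best_words = len(best.split())
--     best_len = len(best)
--     for elem in cluster_elements[1:]:
--         words = len(elem.split())
--         length = len(elem)
--         if words > best_words or (words == best_words and length < best_len):
--             best, best_words, best_len = elem, words, length
--     return best
-- ===== Notes on version B (the rewrite author's own statement) =====
-- stated objective: simpler
-- what changed: Replaced the defaultdict grouping plus sort of the (count, bucket) pairs plus min-by-len over the top bucket with one linear scan that keeps the current best element under the composite order (more words, then shorter, first wins ties).
import Mathlib
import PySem

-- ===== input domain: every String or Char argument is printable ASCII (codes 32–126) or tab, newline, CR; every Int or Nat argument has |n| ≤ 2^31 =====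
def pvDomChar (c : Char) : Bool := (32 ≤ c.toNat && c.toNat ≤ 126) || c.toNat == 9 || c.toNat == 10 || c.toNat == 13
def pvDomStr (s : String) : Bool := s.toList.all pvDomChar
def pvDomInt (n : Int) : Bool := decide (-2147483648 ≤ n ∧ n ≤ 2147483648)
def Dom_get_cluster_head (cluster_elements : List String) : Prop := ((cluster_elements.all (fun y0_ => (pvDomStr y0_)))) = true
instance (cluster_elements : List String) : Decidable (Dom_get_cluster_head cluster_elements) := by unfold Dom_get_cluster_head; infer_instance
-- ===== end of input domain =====

-- B replaces A's defaultdict grouping + bucket sort + min-by-len with one linear scan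
-- keeping the current best under (more words, then shorter, first wins); proved equal on
-- nonempty inputs (both raise IndexError on []).

-- number of words of a string, len(e.split()), as a Python int
def pvWc (e : String) : Int := ((PySem.Str.split₀ e).length : Int)

-- ===== PORT A =====
def get_cluster_head (cluster_elements : List String) : String :=
  let word_counts : PySem.Dict Int (List String) :=
    cluster_elements.foldl
      (fun d elem => d.modify (pvWc elem) [] (fun v => v ++ [elem])) PySem.Dict.empty
  let word_counts_list := PySem.List.sorted word_counts.items (fun x => x.1) true
  match PySem.List.pyGet? word_counts_list 0 with
  | none => ""   -- word_counts_list[0] raises IndexError on empty input (excluded by Pre_)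
  | some top => (PySem.List.min? top.2 (fun s => PySem.Str.len s)).getD ""

-- ===== PORT B =====
def get_cluster_head_alt (cluster_elements : List String) : String :=
  match cluster_elements with
  | [] => ""   -- cluster_elements[0] raises IndexError on empty input (excluded by Pre_)
  | h :: t =>
    (t.foldl
      (fun (best : String × Int × Int) elem =>
        let w := pvWc elem
        let l := PySem.Str.len elem
        if best.2.1 < w ∨ (w = best.2.1 ∧ l < best.2.2) then (elem, w, l) else best)
      (h, pvWc h, PySem.Str.len h)).1

-- ===== PRECONDITION & SPEC =====
-- Both A and B raise IndexError on the empty list; everything else is accepted.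
def Pre_get_cluster_head (cluster_elements : List String) : Prop := cluster_elements ≠ []
instance (cluster_elements : List String) : Decidable (Pre_get_cluster_head cluster_elements) := by unfold Pre_get_cluster_head; infer_instance
def pvWitness_get_cluster_head : List String := ["Tamm", "Uku Tamm", "Uku Tammele"]

def Spec_get_cluster_head (cluster_elements : List String) (out : String) : Prop := out = get_cluster_head_alt cluster_elements
instance (cluster_elements : List String) (out : String) : Decidable (Spec_get_cluster_head cluster_elements out) := by unfold Spec_get_cluster_head; infer_instance

-- ===== CLAIM (what is proved, stated in full; the proofs are below) =====
def Claim_equal_get_cluster_head : Prop := ∀ (cluster_elements : List String), Dom_get_cluster_head cluster_elements → Pre_get_cluster_head cluster_elements → Spec_get_cluster_head cluster_elements (get_cluster_head cluster_elements)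

-- ===== LEMMAS AND PROOFS =====

-- B's loop, on the string component alone
def pvSel (b : String) (t : List String) : String :=
  t.foldl (fun b e =>
    if pvWc b < pvWc e ∨ (pvWc e = pvWc b ∧ PySem.Str.len e < PySem.Str.len b) then e else b) b

lemma pvSel_cons (b e : String) (t : List String) :
    pvSel b (e :: t) =
      pvSel (if pvWc b < pvWc e ∨ (pvWc e = pvWc b ∧ PySem.Str.len e < PySem.Str.len b) then e else b) t := rfl

-- B's fold over the triple state projects to pvSel
lemma alt_eq_pvSel (t : List String) (h : String) :
    get_cluster_head_alt (h :: t) = pvSel h t := by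
  suffices H : ∀ (t : List String) (b : String),
      t.foldl
        (fun (best : String × Int × Int) elem =>
          let w := pvWc elem
          let l := PySem.Str.len elem
          if best.2.1 < w ∨ (w = best.2.1 ∧ l < best.2.2) then (elem, w, l) else best)
        (b, pvWc b, PySem.Str.len b) = (pvSel b t, pvWc (pvSel b t), PySem.Str.len (pvSel b t)) by
    simp only [get_cluster_head_alt]
    rw [H t h]
  intro t
  induction t with
  | nil => intro b; rfl
  | cons e t ih =>
    intro b
    rw [pvSel_cons]
    simp only [List.foldl_cons]
    by_cases hc : pvWc b < pvWc e ∨ (pvWc e = pvWc b ∧ PySem.Str.len e < PySem.Str.len b)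
    · simp only [if_pos hc, ih e]
    · simp only [if_neg hc, ih b]

-- Python's min(xs, key) on a nonempty list is the first-minimum fold
lemma min?_cons_foldl (t : List String) (h : String) (key : String → Int) :
    PySem.List.min? (h :: t) key =
      some (t.foldl (fun m x => if key x < key m then x else m) h) := by
  induction t generalizing h with
  | nil => rfl
  | cons e t ih =>
    show List.foldl _ (some h) (e :: t) = _
    simp only [List.foldl_cons]
    by_cases hc : key e < key h
    · simpa [hc] using ih e
    · simpa [hc] using ih h

lemma min?_cons_cons (t : List String) (h e : String) (key : String → Int) :
    PySem.List.min? (h :: e :: t) key =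
      PySem.List.min? ((if key e < key h then e else h) :: t) key := by
  rw [min?_cons_foldl, min?_cons_foldl]
  simp only [List.foldl_cons]

-- Core: the first minimum-by-len among the elements of maximal word count is B's scan result
lemma min_filter_eq_pvSel (t : List String) (h : String) (k0 : Int)
    (hex : ∃ e ∈ h :: t, pvWc e = k0) (hub : ∀ e ∈ h :: t, pvWc e ≤ k0) :
    PySem.List.min? ((h :: t).filter (fun e => pvWc e == k0)) (fun s => PySem.Str.len s) =
      some (pvSel h t) := by
  induction t generalizing h with
  | nil =>
    obtain ⟨e, he, hk⟩ := hex
    simp only [List.mem_singleton] at he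
    subst he
    simp [hk, PySem.List.min?, pvSel]
  | cons e t ih =>
    rw [pvSel_cons]
    have hhle : pvWc h ≤ k0 := hub h (by simp)
    have hele : pvWc e ≤ k0 := hub e (by simp)
    by_cases hh : pvWc h = k0 <;> by_cases he : pvWc e = k0
    · -- both in the top bucket: the if-test reduces to "e is shorter"
      have hc : (pvWc h < pvWc e ∨ (pvWc e = pvWc h ∧ PySem.Str.len e < PySem.Str.len h)) ↔
          PySem.Str.len e < PySem.Str.len h := by
        constructor
        · rintro (h1 | ⟨-, h2⟩)
          · omega
          · exact h2
        · intro h2; exact Or.inr ⟨by omega, h2⟩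
      have hfil : (h :: e :: t).filter (fun x => pvWc x == k0) =
          h :: e :: t.filter (fun x => pvWc x == k0) := by
        simp [hh, he]
      rw [hfil, min?_cons_cons]
      by_cases hlen : PySem.Str.len e < PySem.Str.len h
      · rw [if_pos hlen, if_pos (hc.mpr hlen)]
        have : (e :: t).filter (fun x => pvWc x == k0) = e :: t.filter (fun x => pvWc x == k0) := by
          simp [he]
        rw [← this]
        exact ih e ⟨e, by simp, he⟩ (fun x hx => hub x (by simp at hx ⊢; tauto))
      · rw [if_neg hlen, if_neg (fun hcc => hlen (hc.mp hcc))]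
        have : (h :: t).filter (fun x => pvWc x == k0) = h :: t.filter (fun x => pvWc x == k0) := by
          simp [hh]
        rw [← this]
        exact ih h ⟨h, by simp, hh⟩ (fun x hx => hub x (by simp at hx ⊢; tauto))
    · -- h in the bucket, e below it: e is dropped and h kept
      have hlt : pvWc e < pvWc h := by omega
      rw [if_neg (by push Not; constructor <;> omega)]
      have : (h :: e :: t).filter (fun x => pvWc x == k0) =
          (h :: t).filter (fun x => pvWc x == k0) := by
        simp [hh, he]
      rw [this]
      exact ih h ⟨h, by simp, hh⟩ (fun x hx => hub x (by simp at hx ⊢; tauto))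
    · -- e in the bucket, h below it: e wins the if-test and h is dropped
      have hlt : pvWc h < pvWc e := by omega
      rw [if_pos (Or.inl hlt)]
      have : (h :: e :: t).filter (fun x => pvWc x == k0) =
          (e :: t).filter (fun x => pvWc x == k0) := by
        simp [hh, he]
      rw [this]
      exact ih e ⟨e, by simp, he⟩ (fun x hx => hub x (by simp at hx ⊢; tauto))
    · -- neither reaches the bucket: both are dropped; the winner is dropped again in the IH
      have hfil : (h :: e :: t).filter (fun x => pvWc x == k0) =
          t.filter (fun x => pvWc x == k0) := by
        simp [hh, he]
      obtain ⟨x, hx, hk⟩ := hex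
      have hxt : x ∈ t := by
        simp only [List.mem_cons] at hx
        rcases hx with rfl | rfl | h1
        · exact absurd hk hh
        · exact absurd hk he
        · exact h1
      by_cases hc : pvWc h < pvWc e ∨ (pvWc e = pvWc h ∧ PySem.Str.len e < PySem.Str.len h)
      · rw [if_pos hc, hfil]
        have := ih e ⟨x, by simp [hxt], hk⟩ (fun y hy => hub y (by simp at hy ⊢; tauto))
        rwa [show (e :: t).filter (fun x => pvWc x == k0) = t.filter (fun x => pvWc x == k0) by
          simp [he]] at this
      · rw [if_neg hc, hfil]
        have := ih h ⟨x, by simp [hxt], hk⟩ (fun y hy => hub y (by simp at hy ⊢; tauto))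
        rwa [show (h :: t).filter (fun x => pvWc x == k0) = t.filter (fun x => pvWc x == k0) by
          simp [hh]] at this

-- A's grouping dict, looked up at any key, is the filter of the input
lemma getD_group (xs : List String) (c : Int) :
    (xs.foldl (fun d elem => d.modify (pvWc elem) [] (fun v => v ++ [elem]))
        (PySem.Dict.empty : PySem.Dict Int (List String))).getD c [] =
      xs.filter (fun e => pvWc e == c) := by
  have hmap : xs.foldl (fun d elem => d.modify (pvWc elem) [] (fun v => v ++ [elem]))
        (PySem.Dict.empty : PySem.Dict Int (List String)) =
      (xs.map (fun e => (pvWc e, e))).foldl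
        (fun d p => d.modify p.1 [] (fun v => v ++ [p.2])) PySem.Dict.empty := by
    rw [List.foldl_map]
  rw [hmap, PySem.Dict.getD_foldl_modify_append]
  simp [List.filter_map, Function.comp_def]

-- ===== VERDICT (by name: the statement is the Claim_ definition above) =====
theorem get_cluster_head_spec : Claim_equal_get_cluster_head := by
  intro xs _ hpre
  unfold Spec_get_cluster_head
  match xs with
  | [] => exact absurd rfl hpre
  | h :: t =>
    rw [alt_eq_pvSel]
    simp only [get_cluster_head]
    set d := (h :: t).foldl (fun d elem => d.modify (pvWc elem) [] (fun v => v ++ [elem]))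
      (PySem.Dict.empty : PySem.Dict Int (List String)) with hd
    have hkeys : d.keys = PySem.Set.update (PySem.Dict.empty : PySem.Dict Int (List String)).keys ((h :: t).map pvWc) := by
      rw [hd]
      exact PySem.Dict.keys_foldl_modify_key (h :: t) pvWc [] (fun _ e v => v ++ [e]) _
    have hnodup : d.keys.Nodup := by
      rw [hd]
      exact PySem.Dict.nodup_keys_foldl_modify_key (h :: t) pvWc [] (fun _ e v => v ++ [e]) _
        PySem.Dict.nodup_keys_empty
    -- the sorted items list is nonempty
    have hne : PySem.List.sorted d.items (fun x => x.1) true ≠ [] := by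
      intro hnil
      rw [PySem.List.sorted_eq_nil_iff] at hnil
      have : d.keys = [] := by simp [PySem.Dict.keys, hnil]
      rw [hkeys] at this
      have hm : pvWc h ∈ (PySem.Set.update (PySem.Dict.empty : PySem.Dict Int (List String)).keys ((h :: t).map pvWc) : List Int) := by
        rw [show PySem.Set.update (PySem.Dict.empty : PySem.Dict Int (List String)).keys ((h :: t).map pvWc) = PySem.Set.ofList ((h :: t).map pvWc) from rfl]
        exact (PySem.Set.mem_ofList _ _).mpr (by simp)
      simp_all
    match hs : PySem.List.sorted d.items (fun x => x.1) true with
    | [] => exact absurd hs hne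
    | p :: rest =>
      have hget : PySem.List.pyGet? (p :: rest) (0 : Int) = some p := by
        simp [PySem.List.pyGet?, PySem.List.pyIdx?]
      rw [hget]
      show (PySem.List.min? p.2 (fun s => PySem.Str.len s)).getD "" = pvSel h t
      have hpitems : p ∈ d.items := by
        rw [← PySem.List.mem_sorted d.items (fun x => x.1) true, hs]; simp
      -- p.1 is the maximum word count
      have hub : ∀ e ∈ h :: t, pvWc e ≤ p.1 := by
        intro e he
        have hkmem : pvWc e ∈ d.keys := by
          rw [hkeys, show PySem.Set.update (PySem.Dict.empty : PySem.Dict Int (List String)).keys ((h :: t).map pvWc) = PySem.Set.ofList ((h :: t).map pvWc) from rfl]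
          exact (PySem.Set.mem_ofList _ _).mpr (List.mem_map_of_mem he)
        have : ∃ q ∈ d.items, q.1 = pvWc e := by
          simpa [PySem.Dict.keys] using hkmem
        obtain ⟨q, hq, hq1⟩ := this
        have := PySem.List.key_head_sorted_rev_ge d.items (fun x => x.1) hs q hq
        simpa [hq1] using this
      have hex : ∃ e ∈ h :: t, pvWc e = p.1 := by
        have : p.1 ∈ d.keys := PySem.Dict.mem_keys_of_mem_items d hpitems
        rw [hkeys, show PySem.Set.update (PySem.Dict.empty : PySem.Dict Int (List String)).keys ((h :: t).map pvWc) = PySem.Set.ofList ((h :: t).map pvWc) from rfl] at this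
        have := (PySem.Set.mem_ofList _ _).mp this
        obtain ⟨e, he, hk⟩ := List.mem_map.mp this
        exact ⟨e, he, hk⟩
      have hp2 : p.2 = (h :: t).filter (fun e => pvWc e == p.1) := by
        have := PySem.Dict.getD_of_mem_items d (k := p.1) (v := p.2) hpitems hnodup []
        rw [← this, hd, getD_group]
      rw [hp2, min_filter_eq_pvSel t h p.1 hex hub]
      rfl
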